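-- pv_equiv track=rewrite | github.com/emmanuel-pogbe/ScriptureType | modules/bible.py | get_verse
-- ===== SOURCE A (Python) =====
-- def get_verse(str,chap_index):
--     found_num = ""
--     first_verse_num = False
--     for i in range(chap_index+1,len(str)):
--         if str[i].isdigit():
--             if first_verse_num == False:
--                 first_verse_num = True
--                 found_num+=str[i]
--             else:
--                 if not str[i-1].isalnum():
--                     break
--                 else:
--                     found_num+= str[i]
--         elif not str[i].isalnum() and first_verse_num:
--             break
--     if len(found_num) == 0:
--         return None
--     return int(found_num)
-- ===== SOURCE B (Python) =====
-- def get_verse(str, chap_index):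
--     s = str[chap_index + 1:]
--     # maximal alnum runs of s: blank out separators, then split on whitespace
--     for run in ''.join(c if c.isalnum() else ' ' for c in s).split():
--         digits = ''.join(c for c in run if c.isdigit())
--         if digits:
--             return int(digits)
--     return None
-- ===== Notes on version B (the rewrite author's own statement) =====
-- stated objective: alternative
-- what changed: Replaces A's single index loop with a first-digit flag and str[i-1] look-back by a slice-then-split decomposition: blank out non-alphanumeric characters, split the suffix into maximal alnum runs, and return the digits of the first run that contains one.
-- outside the precondition, e.g. on get_verse('5 12', -3): A returns 125, B returns 12; on get_verse('12ab3', -3): A returns 3123, B returns 3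
import Mathlib
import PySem

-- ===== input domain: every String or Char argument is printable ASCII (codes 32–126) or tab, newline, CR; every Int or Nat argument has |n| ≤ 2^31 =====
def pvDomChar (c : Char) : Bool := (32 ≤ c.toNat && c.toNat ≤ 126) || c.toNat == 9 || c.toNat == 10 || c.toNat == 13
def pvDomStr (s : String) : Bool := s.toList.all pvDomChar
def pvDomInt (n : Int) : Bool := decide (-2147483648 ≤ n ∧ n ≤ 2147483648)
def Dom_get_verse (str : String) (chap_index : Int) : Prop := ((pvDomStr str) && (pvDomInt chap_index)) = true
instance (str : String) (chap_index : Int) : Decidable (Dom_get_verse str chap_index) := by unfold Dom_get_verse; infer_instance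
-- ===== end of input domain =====

-- B replaces A's single index loop with flag and look-back state by a slice-then-split
-- decomposition (blank out non-alphanumerics, split into maximal alnum runs, take the digits
-- of the first run containing one); same cost, different structure ("alternative").

-- ===== PORT A =====
-- the for-loop of A over range(chap_index+1, len(str)); `break`/fall-through returns found_num
def getVerseLoopA (cs : List Char) : List Int → List Char → Bool → List Char
  | [], found, _ => found
  | i :: rest, found, first =>
    match PySem.List.pyGet? cs i with
    | none => found        -- str[i] raises IndexError in Python; excluded by Pre_get_verse
    | some c =>
      if PySem.Chars.isdigit c then
        if first = false then getVerseLoopA cs rest (found ++ [c]) true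
        else
          match PySem.List.pyGet? cs (i - 1) with
          | none => found  -- str[i-1] raises IndexError in Python; excluded by Pre_get_verse
          | some p =>
            if !(PySem.Chars.isalnum p) then found
            else getVerseLoopA cs rest (found ++ [c]) true
      else if !(PySem.Chars.isalnum c) && first then found
      else getVerseLoopA cs rest found first

def get_verse (str : String) (chap_index : Int) : Option Int :=
  let found := getVerseLoopA str.toList
      (PySem.List.pyRange (chap_index + 1) (PySem.Str.len str) 1) [] false
  if found.length = 0 then none
  else PySem.Int.ofChars? found  -- int(found_num): found_num is a nonempty digit string, so some

-- ===== PORT B =====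
-- for run in runs: digits = ''.join(c for c in run if c.isdigit()); if digits: return int(digits)
def getVerseLoopB : List (List Char) → Option Int
  | [] => none
  | run :: rest =>
    let digits := run.filter (fun c => PySem.Chars.isdigit c)
    if digits.isEmpty then getVerseLoopB rest
    else PySem.Int.ofChars? digits  -- int(digits): nonempty digit string, so some

def get_verse_alt (str : String) (chap_index : Int) : Option Int :=
  let s := PySem.List.slice str.toList (some (chap_index + 1)) none
  let masked := s.map (fun c => if PySem.Chars.isalnum c then c else ' ')
  getVerseLoopB (PySem.Chars.split₀ masked)

-- ===== PRECONDITION & SPEC =====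
-- Pre_ excludes chap_index < -1, where A either raises IndexError or scans via Python's
-- negative-index wraparound (visiting trailing characters and then the whole string again) —
-- outside the function's natural domain of chapter-separator indices; B slices normally there.
def Pre_get_verse (str : String) (chap_index : Int) : Prop := -1 ≤ chap_index
instance (str : String) (chap_index : Int) : Decidable (Pre_get_verse str chap_index) := by
  unfold Pre_get_verse; infer_instance

def pvWitness_get_verse : String × Int := ("Gen 1:1", 5)

def Spec_get_verse (str : String) (chap_index : Int) (out : Option Int) : Prop :=
  out = get_verse_alt str chap_index
instance (str : String) (chap_index : Int) (out : Option Int) :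
    Decidable (Spec_get_verse str chap_index out) := by unfold Spec_get_verse; infer_instance

-- ===== CLAIM (what is proved, stated in full; the proofs are below) =====
def Claim_equal_get_verse : Prop := ∀ (str : String) (chap_index : Int),
  Dom_get_verse str chap_index → Pre_get_verse str chap_index →
  Spec_get_verse str chap_index (get_verse str chap_index)

-- ===== LEMMAS AND PROOFS =====

def coreDigits (t : List Char) : List Char :=
  match t.dropWhile (fun c => !PySem.Chars.isdigit c) with
  | [] => []
  | d :: u => d :: (u.takeWhile (fun c => PySem.Chars.isalnum c)).filter
                      (fun c => PySem.Chars.isdigit c)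

lemma isalnum_of_isdigit {c : Char} (h : PySem.Chars.isdigit c = true) :
    PySem.Chars.isalnum c = true := by
  simp [PySem.Chars.isalnum, h]

lemma not_isdigit_of_not_isalnum {c : Char} (h : PySem.Chars.isalnum c = false) :
    PySem.Chars.isdigit c = false := by
  simp [PySem.Chars.isalnum] at h
  exact h.2

lemma coreDigits_run (l : List Char) :
    coreDigits l =
      if ((l.takeWhile (fun c => PySem.Chars.isalnum c)).filter
            (fun c => PySem.Chars.isdigit c)) = []
      then coreDigits (l.dropWhile (fun c => PySem.Chars.isalnum c))
      else (l.takeWhile (fun c => PySem.Chars.isalnum c)).filter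
            (fun c => PySem.Chars.isdigit c) := by
  induction l with
  | nil => simp
  | cons c l' ih =>
    by_cases ha : PySem.Chars.isalnum c
    · by_cases hd : PySem.Chars.isdigit c
      · simp only [List.takeWhile_cons, ha, if_true, List.filter_cons, hd,
          List.dropWhile_cons]
        simp only [coreDigits, List.dropWhile_cons, hd, Bool.not_true, Bool.false_eq_true,
          if_false]
        simp
      · simp only [List.takeWhile_cons, ha, if_true, List.filter_cons, hd,
          List.dropWhile_cons, Bool.false_eq_true, if_false]
        have hl : coreDigits (c :: l') = coreDigits l' := by
          simp [coreDigits, List.dropWhile_cons, hd]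
        rw [hl, ih]
    · have ha' : PySem.Chars.isalnum c = false := by simpa using ha
      simp [List.takeWhile_cons, ha', List.dropWhile_cons]

lemma split₀_go_acc (s : List Char) (cur : List Char) (acc : List (List Char)) :
    PySem.Chars.split₀.go s cur acc = acc.reverse ++ PySem.Chars.split₀.go s cur [] := by
  induction s generalizing cur acc with
  | nil =>
    simp only [PySem.Chars.split₀.go]
    by_cases h : cur.isEmpty <;> simp [h]
  | cons c rest ih =>
    simp only [PySem.Chars.split₀.go]
    by_cases hs : PySem.Chars.isspace c
    · by_cases h : cur.isEmpty
      · simp only [hs, h, if_true]; exact ih [] acc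
      · simp only [hs, h, if_true, if_false, Bool.false_eq_true]
        rw [ih [] (cur.reverse :: acc), ih [] [cur.reverse]]
        simp
    · simp only [hs, Bool.false_eq_true, if_false]
      exact ih (c :: cur) acc

lemma split₀_space {c : Char} (xs : List Char) (hc : PySem.Chars.isspace c = true) :
    PySem.Chars.split₀ (c :: xs) = PySem.Chars.split₀ xs := by
  simp only [PySem.Chars.split₀, PySem.Chars.split₀.go, hc, if_true, List.isEmpty_nil]

lemma split₀_go_word (s : List Char) (cur : List Char) (acc : List (List Char)) (h : cur ≠ []) :
    PySem.Chars.split₀.go s cur acc =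
      acc.reverse ++ (cur.reverse ++ s.takeWhile (fun d => !PySem.Chars.isspace d)) ::
        PySem.Chars.split₀ (s.dropWhile (fun d => !PySem.Chars.isspace d)) := by
  have hcur : cur.isEmpty = false := by simpa using h
  induction s generalizing cur acc with
  | nil =>
    simp only [PySem.Chars.split₀.go, hcur, List.takeWhile_nil, List.dropWhile_nil]
    simp [PySem.Chars.split₀, PySem.Chars.split₀.go]
  | cons x xs ih =>
    by_cases hs : PySem.Chars.isspace x
    · simp only [PySem.Chars.split₀.go, hs, if_true, hcur, List.takeWhile_cons,
        List.dropWhile_cons, Bool.not_true, Bool.false_eq_true, if_false]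
      rw [split₀_go_acc]
      rw [split₀_space xs hs]
      simp [PySem.Chars.split₀]
    · simp only [PySem.Chars.split₀.go, hs, Bool.false_eq_true, if_false, List.takeWhile_cons,
        List.dropWhile_cons, Bool.not_false, if_true]
      rw [ih (x :: cur) acc (by simp) (by simp)]
      simp

lemma split₀_word {c : Char} (xs : List Char) (hc : PySem.Chars.isspace c = false) :
    PySem.Chars.split₀ (c :: xs) =
      (c :: xs.takeWhile (fun d => !PySem.Chars.isspace d)) ::
        PySem.Chars.split₀ (xs.dropWhile (fun d => !PySem.Chars.isspace d)) := by
  show PySem.Chars.split₀.go (c :: xs) [] [] = _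
  simp only [PySem.Chars.split₀.go, hc, Bool.false_eq_true, if_false]
  rw [split₀_go_word xs [c] [] (by simp)]
  simp

lemma not_isspace_of_isalnum {c : Char} (h : PySem.Chars.isalnum c = true) :
    PySem.Chars.isspace c = false := by
  have e1 : 'A'.val.toNat = 65 := rfl
  have e2 : 'Z'.val.toNat = 90 := rfl
  have e3 : 'a'.val.toNat = 97 := rfl
  have e4 : 'z'.val.toNat = 122 := rfl
  have e5 : '0'.val.toNat = 48 := rfl
  have e6 : '9'.val.toNat = 57 := rfl
  simp only [PySem.Chars.isalnum, PySem.Chars.isalpha, PySem.Chars.isdigit, PySem.Chars.isupper,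
    PySem.Chars.islower, PySem.Chars.isspace, Char.le_def, Bool.or_eq_true, Bool.and_eq_true,
    decide_eq_true_eq, Bool.or_eq_false_iff, Bool.and_eq_false_iff, decide_eq_false_iff_not,
    not_le, UInt32.le_iff_toNat_le, Char.toNat, e1, e2, e3, e4, e5, e6] at *
  omega

lemma map_mask_takeWhile (l : List Char) :
    ((l.takeWhile (fun c => PySem.Chars.isalnum c)).map
        (fun c => if PySem.Chars.isalnum c then c else ' ')) =
      l.takeWhile (fun c => PySem.Chars.isalnum c) := by
  conv_rhs => rw [← List.map_id (l.takeWhile (fun c => PySem.Chars.isalnum c))]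
  apply List.map_congr_left
  intro a ha
  have := List.mem_takeWhile_imp ha
  simp [this]

lemma mask_pred :
    (fun d => !PySem.Chars.isspace (if PySem.Chars.isalnum d then d else ' ')) =
      (fun d => PySem.Chars.isalnum d) := by
  funext d
  by_cases h : PySem.Chars.isalnum d
  · simp [h, not_isspace_of_isalnum h]
  · have h' : PySem.Chars.isalnum d = false := by simpa using h
    simp [h', show PySem.Chars.isspace ' ' = true from rfl]

lemma loopB_split (t : List Char) :
    getVerseLoopB (PySem.Chars.split₀
        (t.map (fun c => if PySem.Chars.isalnum c then c else ' '))) =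
      (if coreDigits t = [] then none else PySem.Int.ofChars? (coreDigits t)) := by
  have H : ∀ (n : Nat) (t : List Char), t.length ≤ n →
      getVerseLoopB (PySem.Chars.split₀
          (t.map (fun c => if PySem.Chars.isalnum c then c else ' '))) =
        (if coreDigits t = [] then none else PySem.Int.ofChars? (coreDigits t)) := by
    intro n
    induction n with
    | zero =>
      intro t ht
      have : t = [] := by cases t <;> simp_all
      subst this
      simp [coreDigits, getVerseLoopB, PySem.Chars.split₀, PySem.Chars.split₀.go]
    | succ n ih =>
      intro t ht
      cases t with
      | nil => simp [coreDigits, getVerseLoopB, PySem.Chars.split₀, PySem.Chars.split₀.go]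
      | cons c t' =>
        simp only [List.map_cons]
        by_cases ha : PySem.Chars.isalnum c
        · rw [if_pos ha]
          rw [split₀_word _ (not_isspace_of_isalnum ha)]
          rw [List.takeWhile_map, List.dropWhile_map]
          simp only [Function.comp_def, mask_pred, map_mask_takeWhile]
          have hcd := coreDigits_run (c :: t')
          have htw : (c :: t').takeWhile (fun c => PySem.Chars.isalnum c) =
              c :: t'.takeWhile (fun c => PySem.Chars.isalnum c) := by
            simp [List.takeWhile_cons, ha]
          by_cases hdig : ((c :: t'.takeWhile (fun c => PySem.Chars.isalnum c)).filter
              (fun c => PySem.Chars.isdigit c)) = []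
          · rw [getVerseLoopB]
            simp only [hdig, List.isEmpty_nil, if_true]
            have hdrop : (c :: t').dropWhile (fun c => PySem.Chars.isalnum c) =
                t'.dropWhile (fun c => PySem.Chars.isalnum c) := by
              simp [List.dropWhile_cons, ha]
            rw [htw, hdig, if_pos rfl, hdrop] at hcd
            rw [hcd]
            exact ih _ (le_trans (List.length_dropWhile_le _ _) (by simpa using ht))
          · rw [getVerseLoopB]
            rw [if_neg (by simpa using hdig)]
            rw [htw, if_neg hdig] at hcd
            rw [hcd, if_neg hdig]
        · have ha' : PySem.Chars.isalnum c = false := by simpa using ha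
          rw [if_neg (by simp [ha'])]
          rw [split₀_space _ (show PySem.Chars.isspace ' ' = true from rfl)]
          have hcd : coreDigits (c :: t') = coreDigits t' := by
            simp [coreDigits, List.dropWhile_cons, not_isdigit_of_not_isalnum ha']
          rw [hcd]
          exact ih t' (by simpa using ht)
  exact H t.length t le_rfl

lemma loopA_phase2 (cs : List Char) : ∀ (n j : Nat) (acc : List Char),
    cs.length - j ≤ n → 1 ≤ j → j ≤ cs.length →
    (∃ hh : j - 1 < cs.length, PySem.Chars.isalnum cs[j - 1] = true) →
    getVerseLoopA cs (PySem.List.pyRange (j : Int) (cs.length : Int) 1) acc true =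
      acc ++ ((cs.drop j).takeWhile (fun c => PySem.Chars.isalnum c)).filter
                (fun c => PySem.Chars.isdigit c) := by
  intro n
  induction n with
  | zero =>
    intro j acc hn h1 h2 hp
    have hj : j = cs.length := by omega
    subst hj
    rw [PySem.List.pyRange_one_eq_nil (by omega)]
    simp [getVerseLoopA]
  | succ n ih =>
    intro j acc hn h1 h2 hp
    by_cases hlt : j < cs.length
    · rw [PySem.List.pyRange_one_cons (by exact_mod_cast hlt)]
      simp only [getVerseLoopA, PySem.List.pyGet?_natCast, List.getElem?_eq_getElem hlt]
      obtain ⟨hh, hpa⟩ := hp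
      have hidx : (j : Int) - 1 = ((j - 1 : Nat) : Int) := by omega
      have hstep : (j : Int) + 1 = ((j + 1 : Nat) : Int) := by omega
      by_cases hd : PySem.Chars.isdigit cs[j]
      · simp only [hd, if_true, hidx, PySem.List.pyGet?_natCast,
          List.getElem?_eq_getElem hh, hpa, Bool.not_true, Bool.false_eq_true, if_false,
          Bool.true_eq_false]
        rw [hstep, ih (j + 1) (acc ++ [cs[j]]) (by omega) (by omega) (by omega)
          ⟨by simpa using hlt, by simpa using hd.symm ▸ isalnum_of_isdigit hd⟩]
        conv_rhs => rw [List.drop_eq_getElem_cons hlt, List.takeWhile_cons]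
        simp [isalnum_of_isdigit hd, List.filter_cons, hd]
      · have hd' : PySem.Chars.isdigit cs[j] = false := by simpa using hd
        by_cases ha : PySem.Chars.isalnum cs[j]
        · simp only [getVerseLoopA, hd', Bool.false_eq_true, if_false, ha, Bool.not_true,
            Bool.false_and, if_false]
          rw [hstep, ih (j + 1) acc (by omega) (by omega) (by omega)
            ⟨by simpa using hlt, by simpa using ha⟩]
          conv_rhs => rw [List.drop_eq_getElem_cons hlt, List.takeWhile_cons]
          simp [ha, List.filter_cons, hd']
        · have ha' : PySem.Chars.isalnum cs[j] = false := by simpa using ha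
          conv_rhs => rw [List.drop_eq_getElem_cons hlt, List.takeWhile_cons]
          simp [getVerseLoopA, hd', ha']
    · have hj : j = cs.length := by omega
      subst hj
      rw [PySem.List.pyRange_one_eq_nil (by omega)]
      simp [getVerseLoopA]

lemma loopA_phase1 (cs : List Char) : ∀ (n j : Nat),
    cs.length - j ≤ n →
    getVerseLoopA cs (PySem.List.pyRange (j : Int) (cs.length : Int) 1) [] false =
      coreDigits (cs.drop j) := by
  intro n
  induction n with
  | zero =>
    intro j hn
    rw [PySem.List.pyRange_one_eq_nil (by omega), List.drop_eq_nil_of_le (by omega)]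
    simp [getVerseLoopA, coreDigits]
  | succ n ih =>
    intro j hn
    by_cases hlt : j < cs.length
    · rw [PySem.List.pyRange_one_cons (by exact_mod_cast hlt)]
      simp only [getVerseLoopA, PySem.List.pyGet?_natCast, List.getElem?_eq_getElem hlt]
      have hstep : (j : Int) + 1 = ((j + 1 : Nat) : Int) := by omega
      by_cases hd : PySem.Chars.isdigit cs[j]
      · simp only [hd, if_true]
        rw [hstep, List.nil_append, loopA_phase2 cs (cs.length - (j + 1)) (j + 1) [cs[j]]
          (by omega) (by omega) (by omega)
          ⟨by simpa using hlt, by simpa using isalnum_of_isdigit hd⟩]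
        conv_rhs => rw [coreDigits]
        conv_rhs => rw [List.drop_eq_getElem_cons hlt, List.dropWhile_cons]
        simp only [hd, Bool.not_true, Bool.false_eq_true, if_false, List.singleton_append]
      · have hd' : PySem.Chars.isdigit cs[j] = false := by simpa using hd
        simp only [getVerseLoopA, hd', Bool.false_eq_true, if_false, Bool.and_false]
        rw [hstep, ih (j + 1) (by omega)]
        show coreDigits _ = coreDigits _
        conv_rhs => rw [coreDigits]
        conv_rhs => rw [List.drop_eq_getElem_cons hlt, List.dropWhile_cons]
        simp [hd', coreDigits]
    · rw [PySem.List.pyRange_one_eq_nil (by omega), List.drop_eq_nil_of_le (by omega)]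
      simp [getVerseLoopA, coreDigits]

-- ===== VERDICT (by name: the statement is the Claim_ definition above) =====
theorem get_verse_spec : Claim_equal_get_verse := by
  intro str chap_index _ hpre
  unfold Pre_get_verse at hpre
  unfold Spec_get_verse get_verse get_verse_alt
  have h0 : (0:Int) ≤ chap_index + 1 := by omega
  have hj : chap_index + 1 = (((chap_index + 1).toNat : Nat) : Int) := by omega
  rw [PySem.List.slice_from _ h0, loopB_split]
  have hlen : PySem.Str.len str = (str.toList.length : Int) := by simp
  rw [hlen, hj, loopA_phase1 str.toList ((str.toList.length) - (chap_index + 1).toNat)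
    (chap_index + 1).toNat (by omega)]
  simp [List.length_eq_zero_iff, max_eq_left h0]
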